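-- pv_equiv track=rewrite | github.com/cybercomet-07/NaNoOrin | orin-ai/backend/analyzer.py | _prioritize_files
-- ===== SOURCE A (Python) =====
-- _PRIORITY_FILES = (
--     "readme",
--     "license",
--     "package.json",
--     "pyproject.toml",
--     "requirements.txt",
--     "setup.py",
--     "dockerfile",
--     "docker-compose",
--     "tsconfig.json",
--     "next.config",
--     "vite.config",
--     "cargo.toml",
--     "go.mod",
--     "main.py",
--     "app.py",
--     "index.ts",
--     "index.js",
--     ".env",
--     "makefile",
--     "schema.prisma",
-- )
--
-- def _prioritize_files(paths: list[str]) -> list[str]: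
--     head: list[str] = []
--     tail: list[str] = []
--     for p in paths:
--         low = p.lower()
--         if any(key in low for key in _PRIORITY_FILES):
--             head.append(p)
--         else:
--             tail.append(p)
--     # Stable sort inside each bucket, shortest (shallowest) paths first.
--     head.sort(key=lambda s: (s.count("/"), s.lower()))
--     tail.sort(key=lambda s: (s.count("/"), s.lower()))
--     return head + tail
-- ===== SOURCE B (Python) =====
-- _PRIORITY_FILES = (
--     "readme",
--     "license",
--     "package.json",
--     "pyproject.toml",
--     "requirements.txt",
--     "setup.py",
--     "dockerfile",
--     "docker-compose",
--     "tsconfig.json",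
--     "next.config",
--     "vite.config",
--     "cargo.toml",
--     "go.mod",
--     "main.py",
--     "app.py",
--     "index.ts",
--     "index.js",
--     ".env",
--     "makefile",
--     "schema.prisma",
-- )
--
--
-- def _prioritize_files(paths: list[str]) -> list[str]:
--     # Online stable insertion sort under one composite key
--     # (priority flag, depth, lowercased path): no library sort, no buckets.
--     out: list[str] = []
--     keys: list[tuple[int, int, str]] = []
--     for p in paths:
--         low = p.lower()
--         kp = (0 if any(k in low for k in _PRIORITY_FILES) else 1, p.count("/"), low)
--         i = 0
--         while i < len(keys) and keys[i] <= kp: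
--             i += 1
--         out.insert(i, p)
--         keys.insert(i, kp)
--     return out
-- ===== Notes on version B (the rewrite author's own statement) =====
-- stated objective: alternative
-- what changed: A partitions paths into head/tail buckets and runs two library sorts with a (depth, lowercase) key; B uses no library sort and no buckets: it builds the result online by a stable insertion sort under one composite key (priority flag, depth, lowercased path).
import Mathlib
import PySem

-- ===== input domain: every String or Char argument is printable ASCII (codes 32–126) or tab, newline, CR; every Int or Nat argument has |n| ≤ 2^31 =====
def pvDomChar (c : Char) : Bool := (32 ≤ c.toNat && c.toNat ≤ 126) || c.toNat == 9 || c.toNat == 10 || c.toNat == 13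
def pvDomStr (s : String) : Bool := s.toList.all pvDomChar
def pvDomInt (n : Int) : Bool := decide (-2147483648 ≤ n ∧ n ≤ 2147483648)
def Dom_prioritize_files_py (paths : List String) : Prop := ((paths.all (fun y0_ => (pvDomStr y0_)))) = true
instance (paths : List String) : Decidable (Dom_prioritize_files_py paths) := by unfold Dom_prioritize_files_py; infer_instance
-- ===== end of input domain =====

-- B replaces A's partition + two library sorts by an online stable insertion sort under one
-- composite key (priority flag, depth, lowercased path) — objective: alternative algorithm.

-- _PRIORITY_FILES (shared module constant)
def pvPriorityFiles : List String :=
  ["readme", "license", "package.json", "pyproject.toml", "requirements.txt", "setup.py",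
   "dockerfile", "docker-compose", "tsconfig.json", "next.config", "vite.config",
   "cargo.toml", "go.mod", "main.py", "app.py", "index.ts", "index.js", ".env",
   "makefile", "schema.prisma"]

-- low = p.lower(); any(key in low for key in _PRIORITY_FILES)   (appears in both A and B)
def pvIsPriority (p : String) : Bool :=
  pvPriorityFiles.any (fun key => PySem.Str.isIn key (PySem.Str.lower p))

-- the sort key components s.count("/") and s.lower()
def pvKeyCount (s : String) : Nat := PySem.Str.count s "/"
def pvKeyLower (s : String) : String := PySem.Str.lower s

-- ===== PORT A =====
def prioritize_files_py (paths : List String) : List String :=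
  -- the for-loop filling head / tail
  let ht := paths.foldl
    (fun (acc : List String × List String) p =>
      if pvIsPriority p then (acc.1 ++ [p], acc.2) else (acc.1, acc.2 ++ [p]))
    ([], [])
  -- head.sort(key=…); tail.sort(key=…); return head + tail
  PySem.List.sorted2 ht.1 pvKeyCount pvKeyLower ++ PySem.List.sorted2 ht.2 pvKeyCount pvKeyLower

-- ===== PORT B =====
-- B's composite key kp = (0 if priority else 1, p.count("/"), p.lower())
def pvKey (p : String) : Nat × Nat × String :=
  ((if pvIsPriority p then 0 else 1), pvKeyCount p, pvKeyLower p)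

-- Python tuple comparison keys[i] <= kp (lexicographic on the triple)
def pvKeyLe (a b : Nat × Nat × String) : Bool :=
  decide (a.1 < b.1) ||
    (a.1 == b.1 && (decide (a.2.1 < b.2.1) || (a.2.1 == b.2.1 && decide (a.2.2 ≤ b.2.2))))

-- the scan 'i = 0; while i < len(keys) and keys[i] <= kp: i += 1' followed by the two inserts
-- at position i, carrying out/keys as one list of (path, key) pairs
def pvInsertKeyed (x : String) (kx : Nat × Nat × String) :
    List (String × (Nat × Nat × String)) → List (String × (Nat × Nat × String))
  | [] => [(x, kx)]
  | (y, ky) :: rest =>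
      if pvKeyLe ky kx then (y, ky) :: pvInsertKeyed x kx rest
      else (x, kx) :: (y, ky) :: rest

def prioritize_files_py_alt (paths : List String) : List String :=
  (paths.foldl (fun acc p => pvInsertKeyed p (pvKey p) acc) []).map Prod.fst

-- ===== PRECONDITION & SPEC =====
def Spec_prioritize_files_py (paths : List String) (out : List String) : Prop := out = prioritize_files_py_alt paths
instance (paths : List String) (out : List String) : Decidable (Spec_prioritize_files_py paths out) := by unfold Spec_prioritize_files_py; infer_instance

-- ===== CLAIM (what is proved, stated in full; the proofs are below) =====
def Claim_equal_prioritize_files_py : Prop := ∀ (paths : List String), Dom_prioritize_files_py paths → Spec_prioritize_files_py paths (prioritize_files_py paths)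

-- ===== LEMMAS AND PROOFS =====

-- the comparator sorted2 uses (reverse = false)
def pvBfA (a b : String) : Bool :=
  decide (pvKeyCount a < pvKeyCount b) ||
    (!decide (pvKeyCount b < pvKeyCount a) && decide (pvKeyLower a < pvKeyLower b))

-- B's insert condition as a strict 'before' comparator: x goes before y iff ¬ (key y ≤ key x)
def pvBfB (a b : String) : Bool := !pvKeyLe (pvKey b) (pvKey a)

theorem sorted2_eq_foldlA (xs : List String) :
    PySem.List.sorted2 xs pvKeyCount pvKeyLower =
      xs.foldl (fun a x => PySem.List.insertBy pvBfA x a) [] := by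
  simp only [PySem.List.sorted2]
  simp only [if_neg (by decide : ¬ (false = true))]
  rfl

-- !( (f,c2,s2) <= (f,c1,s1) ) is sorted2's strict comparator on (c,s), when the flags agree
theorem keyLe_same_flag (c1 c2 : Nat) (s1 s2 : String) (f : Nat) :
    (!pvKeyLe (f, c2, s2) (f, c1, s1)) =
      (decide (c1 < c2) || (!decide (c2 < c1) && decide (s1 < s2))) := by
  simp only [pvKeyLe]
  rcases lt_trichotomy c1 c2 with hc | hc | hc
  · simp [hc, Nat.lt_asymm hc, Nat.ne_of_gt hc]
  · simp [hc, ← decide_not]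
  · simp [hc, Nat.lt_asymm hc]

-- equal-flag case: B's comparator coincides with A's bucket comparator
theorem bfB_eq_bfA {a b : String} (h : pvIsPriority a = pvIsPriority b) :
    pvBfB a b = pvBfA a b := by
  simp only [pvBfB, pvBfA, pvKey, h]
  exact keyLe_same_flag (pvKeyCount a) (pvKeyCount b) (pvKeyLower a) (pvKeyLower b) _

theorem bfB_of_flag_lt {a b : String} (ha : pvIsPriority a = true)
    (hb : pvIsPriority b = false) : pvBfB a b = true := by
  simp [pvBfB, pvKeyLe, pvKey, ha, hb]

theorem bfB_of_flag_gt {a b : String} (ha : pvIsPriority a = false)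
    (hb : pvIsPriority b = true) : pvBfB a b = false := by
  simp [pvBfB, pvKeyLe, pvKey, ha, hb]

-- pvInsertKeyed IS insertBy pvBfB on the paths, carrying the keys along
theorem insertKeyed_eq (x : String) (l : List String) :
    pvInsertKeyed x (pvKey x) (l.map (fun y => (y, pvKey y))) =
      (PySem.List.insertBy pvBfB x l).map (fun y => (y, pvKey y)) := by
  induction l with
  | nil => rfl
  | cons y ys ih =>
    cases h : pvKeyLe (pvKey y) (pvKey x)
    · simp [pvInsertKeyed, PySem.List.insertBy, pvBfB, h]
    · simp [pvInsertKeyed, PySem.List.insertBy, pvBfB, h, ih]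

theorem foldB_eq (paths l : List String) :
    paths.foldl (fun acc p => pvInsertKeyed p (pvKey p) acc) (l.map (fun y => (y, pvKey y))) =
      (paths.foldl (fun acc p => PySem.List.insertBy pvBfB p acc) l).map
        (fun y => (y, pvKey y)) := by
  induction paths generalizing l with
  | nil => rfl
  | cons p ps ih =>
    simp only [List.foldl_cons]
    rw [insertKeyed_eq, ih]

-- generic insertBy facts specific to this proof
theorem insertBy_front {α : Type} (bf : α → α → Bool) (x : α) (l : List α)
    (h : ∀ z ∈ l, bf x z = true) : PySem.List.insertBy bf x l = x :: l := by
  cases l with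
  | nil => rfl
  | cons y ys => simp [PySem.List.insertBy, h y (List.mem_cons_self)]

theorem insertBy_skip {α : Type} (bf : α → α → Bool) (x : α) (l1 l2 : List α)
    (h : ∀ z ∈ l1, bf x z = false) :
    PySem.List.insertBy bf x (l1 ++ l2) = l1 ++ PySem.List.insertBy bf x l2 := by
  induction l1 with
  | nil => rfl
  | cons y ys ih =>
    simp only [List.cons_append, PySem.List.insertBy, h y List.mem_cons_self]
    simp [ih (fun z hz => h z (List.mem_cons_of_mem _ hz))]

theorem insertBy_congr {α : Type} (bf1 bf2 : α → α → Bool) (x : α) (l : List α)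
    (h : ∀ z ∈ l, bf1 x z = bf2 x z) :
    PySem.List.insertBy bf1 x l = PySem.List.insertBy bf2 x l := by
  induction l with
  | nil => rfl
  | cons y ys ih =>
    simp only [PySem.List.insertBy, h y List.mem_cons_self]
    cases bf2 x y <;> simp [ih (fun z hz => h z (List.mem_cons_of_mem _ hz))]

-- the key structural fact: inserting with the composite comparator into
-- (sorted priority block ++ sorted non-priority block) inserts into the right block
theorem insert_split (x : String) (SA SB : List String)
    (hA : ∀ y ∈ SA, pvIsPriority y = true) (hB : ∀ y ∈ SB, pvIsPriority y = false) :
    PySem.List.insertBy pvBfB x (SA ++ SB) =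
      if pvIsPriority x then PySem.List.insertBy pvBfA x SA ++ SB
      else SA ++ PySem.List.insertBy pvBfA x SB := by
  cases hx : pvIsPriority x with
  | true =>
    simp only [if_true]
    induction SA with
    | nil =>
      simp only [List.nil_append]
      rw [insertBy_front pvBfB x SB (fun z hz => bfB_of_flag_lt hx (hB z hz))]
      rfl
    | cons y ys ih =>
      have hy := hA y List.mem_cons_self
      have hbb : pvBfB x y = pvBfA x y := bfB_eq_bfA (hx.trans hy.symm)
      simp only [List.cons_append, PySem.List.insertBy, hbb]
      cases h : pvBfA x y
      · simp only [Bool.false_eq_true, if_false]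
        rw [ih (fun z hz => hA z (List.mem_cons_of_mem _ hz)), List.cons_append]
      · simp
  | false =>
    simp only [if_false, Bool.false_eq_true]
    rw [insertBy_skip pvBfB x SA SB (fun z hz => bfB_of_flag_gt hx (hA z hz))]
    rw [insertBy_congr pvBfB pvBfA x SB
        (fun z hz => bfB_eq_bfA (hx.trans (hB z hz).symm))]

-- membership of the sorted buckets
theorem mem_foldl_insertBy {α : Type} (bf : α → α → Bool) (xs acc : List α) (y : α)
    (h : y ∈ xs.foldl (fun a x => PySem.List.insertBy bf x a) acc) : y ∈ acc ∨ y ∈ xs := by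
  induction xs generalizing acc with
  | nil => exact Or.inl h
  | cons x xs ih =>
    rcases ih _ h with h' | h'
    · rcases (PySem.List.mem_insertBy _ _ _ _).mp h' with rfl | h''
      · exact Or.inr List.mem_cons_self
      · exact Or.inl h''
    · exact Or.inr (List.mem_cons_of_mem _ h')

theorem mem_sorted2A (xs : List String) (y : String)
    (h : y ∈ PySem.List.sorted2 xs pvKeyCount pvKeyLower) : y ∈ xs := by
  rw [sorted2_eq_foldlA] at h
  rcases mem_foldl_insertBy _ _ _ _ h with h' | h'
  · exact absurd h' (List.not_mem_nil)
  · exact h'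

-- B's fold computes sorted2(priority filter) ++ sorted2(rest)
theorem foldB_main (paths : List String) :
    paths.foldl (fun acc p => PySem.List.insertBy pvBfB p acc) [] =
      PySem.List.sorted2 (paths.filter (fun p => pvIsPriority p)) pvKeyCount pvKeyLower ++
      PySem.List.sorted2 (paths.filter (fun p => !pvIsPriority p)) pvKeyCount pvKeyLower := by
  induction paths using List.reverseRecOn with
  | nil => rfl
  | append_singleton xs x ih =>
    rw [List.foldl_append, List.foldl_cons, List.foldl_nil, ih]
    have hA : ∀ y ∈ PySem.List.sorted2 (xs.filter (fun p => pvIsPriority p)) pvKeyCount pvKeyLower,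
        pvIsPriority y = true := by
      intro y hy
      simpa using List.of_mem_filter (mem_sorted2A _ _ hy)
    have hB : ∀ y ∈ PySem.List.sorted2 (xs.filter (fun p => !pvIsPriority p)) pvKeyCount pvKeyLower,
        pvIsPriority y = false := by
      intro y hy
      simpa using List.of_mem_filter (mem_sorted2A _ _ hy)
    rw [insert_split x _ _ hA hB]
    cases hx : pvIsPriority x <;>
      simp [hx, List.filter_append, sorted2_eq_foldlA, List.foldl_append]

-- A's head/tail loop builds the two filters
theorem ht_loop_eq (paths : List String) :
    paths.foldl
      (fun (acc : List String × List String) p =>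
        if pvIsPriority p then (acc.1 ++ [p], acc.2) else (acc.1, acc.2 ++ [p]))
      ([], []) =
    (paths.filter (fun p => pvIsPriority p), paths.filter (fun p => !pvIsPriority p)) := by
  induction paths using List.reverseRecOn with
  | nil => simp
  | append_singleton xs x ih =>
    cases h : pvIsPriority x <;>
      simp [List.foldl_append, ih, List.filter_append, h]

-- ===== VERDICT (by name: the statement is the Claim_ definition above) =====
theorem prioritize_files_py_spec : Claim_equal_prioritize_files_py := by
  intro paths _
  unfold Spec_prioritize_files_py
  simp only [prioritize_files_py, prioritize_files_py_alt]
  rw [ht_loop_eq]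
  have h0 : ([] : List (String × (Nat × Nat × String))) = ([] : List String).map (fun y => (y, pvKey y)) := rfl
  rw [h0, foldB_eq, foldB_main]
  simp [Function.comp_def]
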